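-- pv_equiv track=rewrite | github.com/AnuR1234/Master_Thesis_codebase | RAG Architectures/Open-Source RAG/generator.py | _clean_context_preserving_structure
-- ===== SOURCE A (Python) =====
-- def _clean_context_preserving_structure(context: str) -> str:
--     """
--     Clean context while preserving important structure.
--
--     Removes common artifacts and formatting issues while maintaining
--     the logical structure of the documentation content.
--
--     Args:
--         context (str): Raw context from document retrieval
--
--     Returns:
--         str: Cleaned context with preserved structure
--     """
--     if not context:
--         return ""
--
--     # Remove obvious artifacts but preserve formatting
--     cleaned = context.replace("DOCUMNET", "DOCUMENT")
--     cleaned = cleaned.replace("##END OF CODE SNIPLET##", "")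
--     cleaned = cleaned.replace("##END OF CODE SNIPPET##", "")
--     cleaned = cleaned.replace("#END OF CODE", "")
--     cleaned = cleaned.replace("============", "")
--
--     # Fix common formatting issues
--     cleaned = cleaned.replace("job\\_", "job_")
--     cleaned = cleaned.replace("\\_", "_")
--     cleaned = cleaned.replace("__", "_")
--
--     # Preserve document structure but clean up formatting
--     lines = cleaned.split('\n')
--     processed_lines = []
--
--     for line in lines:
--         # Clean up excess spaces within lines but preserve line structure
--         processed_line = ' '.join(line.split())
--         if processed_line:  # Only add non-empty lines
--             processed_lines.append(processed_line)
--         elif processed_lines and processed_lines[-1]:  # Preserve paragraph breaks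
--             processed_lines.append("")
--
--     return '\n'.join(processed_lines)
-- ===== SOURCE B (Python) =====
-- def _clean_context_preserving_structure(context: str) -> str:
--     """Run-based re-implementation: normalize every line once, then scan maximal
--     runs of blank/non-blank lines, extending the result with non-blank runs and
--     emitting at most one blank separator line per blank run."""
--     cleaned = (
--         context.replace("DOCUMNET", "DOCUMENT")
--         .replace("##END OF CODE SNIPLET##", "")
--         .replace("##END OF CODE SNIPPET##", "")
--         .replace("#END OF CODE", "")
--         .replace("============", "")
--         .replace("job\\_", "job_")
--         .replace("\\_", "_")
--         .replace("__", "_")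
--     )
--     normalized = [' '.join(line.split()) for line in cleaned.split('\n')]
--     result = []
--     n = len(normalized)
--     i = 0
--     while i < n:
--         j = i
--         while j < n and bool(normalized[j]) == bool(normalized[i]):
--             j += 1
--         if normalized[i]:
--             result.extend(normalized[i:j])
--         elif result and result[-1]:
--             result.append("")
--         i = j
--     return '\n'.join(result)
-- ===== Notes on version B (the rewrite author's own statement) =====
-- stated objective: alternative
-- what changed: Replaces A's element-by-element loop that appends lines while inspecting processed_lines[-1] with a run-based pass: every line is whitespace-normalized once, then a two-index scan walks maximal runs of blank/non-blank lines, extending the result with each non-blank run and emitting at most one blank separator line per blank run.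
import Mathlib
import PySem

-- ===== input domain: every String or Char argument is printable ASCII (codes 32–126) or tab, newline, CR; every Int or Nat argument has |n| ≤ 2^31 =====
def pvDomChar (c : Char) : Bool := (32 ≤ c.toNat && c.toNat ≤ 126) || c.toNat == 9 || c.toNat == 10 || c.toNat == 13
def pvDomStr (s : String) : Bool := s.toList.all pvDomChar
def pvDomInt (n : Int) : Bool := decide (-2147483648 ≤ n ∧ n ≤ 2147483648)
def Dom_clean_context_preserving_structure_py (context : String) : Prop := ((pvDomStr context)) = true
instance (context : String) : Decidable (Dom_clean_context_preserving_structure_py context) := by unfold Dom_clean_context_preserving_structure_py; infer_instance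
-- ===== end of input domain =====

-- B rewrites A's per-line loop (appending and inspecting processed_lines[-1]) as a run-based scan
-- over maximal blank/non-blank runs of the pre-normalized lines; objective: alternative decomposition, same cost.

-- ===== PORT A =====
def clean_context_preserving_structure_py (context : String) : String :=
  if context = "" then ""
  else
    let cleaned := PySem.Str.replace context "DOCUMNET" "DOCUMENT"
    let cleaned := PySem.Str.replace cleaned "##END OF CODE SNIPLET##" ""
    let cleaned := PySem.Str.replace cleaned "##END OF CODE SNIPPET##" ""
    let cleaned := PySem.Str.replace cleaned "#END OF CODE" ""
    let cleaned := PySem.Str.replace cleaned "============" ""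
    let cleaned := PySem.Str.replace cleaned "job\\_" "job_"
    let cleaned := PySem.Str.replace cleaned "\\_" "_"
    let cleaned := PySem.Str.replace cleaned "__" "_"
    let lines := (PySem.Str.split? cleaned "\n").getD []
    -- 'processed_lines and processed_lines[-1]' ported as getLast?.getD "" ≠ "" (empty list and last == "" both fall through to the same else)
    let processed := lines.foldl (fun acc line =>
      let p := PySem.Str.join " " (PySem.Str.split₀ line)
      if p ≠ "" then acc ++ [p]
      else if acc.getLast?.getD "" ≠ "" then acc ++ [""] else acc) []
    PySem.Str.join "\n" processed

-- ===== PORT B =====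
-- the inner 'while j < n and bool == bool' run scan of Source B, as structural recursion with the current run accumulated
def pvRunsGo (b : Bool) (cur : List String) : List String → List (List String)
  | [] => [cur]
  | x :: xs => if (x != "") == b then pvRunsGo b (cur ++ [x]) xs else cur :: pvRunsGo (x != "") [x] xs

def pvRunsB : List String → List (List String)
  | [] => []
  | l :: ls => pvRunsGo (l != "") [l] ls

def clean_context_preserving_structure_py_alt (context : String) : String :=
  let cleaned := PySem.Str.replace context "DOCUMNET" "DOCUMENT"
  let cleaned := PySem.Str.replace cleaned "##END OF CODE SNIPLET##" ""
  let cleaned := PySem.Str.replace cleaned "##END OF CODE SNIPPET##" ""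
  let cleaned := PySem.Str.replace cleaned "#END OF CODE" ""
  let cleaned := PySem.Str.replace cleaned "============" ""
  let cleaned := PySem.Str.replace cleaned "job\\_" "job_"
  let cleaned := PySem.Str.replace cleaned "\\_" "_"
  let cleaned := PySem.Str.replace cleaned "__" "_"
  let normalized := ((PySem.Str.split? cleaned "\n").getD []).map
      (fun line => PySem.Str.join " " (PySem.Str.split₀ line))
  let result := (pvRunsB normalized).foldl (fun acc run =>
      if run.headD "" != "" then acc ++ run
      else if acc ≠ [] ∧ acc.getLast?.getD "" ≠ "" then acc ++ [""] else acc) []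
  PySem.Str.join "\n" result

-- ===== PRECONDITION & SPEC =====
def Spec_clean_context_preserving_structure_py (context : String) (out : String) : Prop := out = clean_context_preserving_structure_py_alt context
instance (context : String) (out : String) : Decidable (Spec_clean_context_preserving_structure_py context out) := by unfold Spec_clean_context_preserving_structure_py; infer_instance

-- ===== CLAIM (what is proved, stated in full; the proofs are below) =====
def Claim_equal_clean_context_preserving_structure_py : Prop := ∀ (context : String), Dom_clean_context_preserving_structure_py context → Spec_clean_context_preserving_structure_py context (clean_context_preserving_structure_py context)

-- ===== LEMMAS AND PROOFS =====

-- A's per-line step, over an already-normalized line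
def pvStepA (acc : List String) (p : String) : List String :=
  if p ≠ "" then acc ++ [p]
  else if acc.getLast?.getD "" ≠ "" then acc ++ [""] else acc

def pvStepRun (acc : List String) (run : List String) : List String :=
  if run.headD "" != "" then acc ++ run
  else if acc ≠ [] ∧ acc.getLast?.getD "" ≠ "" then acc ++ [""] else acc

lemma pvStepA_blank_idem (acc : List String) : pvStepA (pvStepA acc "") "" = pvStepA acc "" := by
  unfold pvStepA
  simp only [ne_eq, not_true_eq_false, if_false]
  by_cases h : acc.getLast?.getD "" ≠ ""
  · simp [h]
  · simp [h]

lemma pvFold_nonblank (run acc : List String) (h : ∀ x ∈ run, x ≠ "") :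
    run.foldl pvStepA acc = acc ++ run := by
  induction run generalizing acc with
  | nil => simp
  | cons a t ih =>
    have ha : a ≠ "" := h a (by simp)
    simp only [List.foldl_cons]
    rw [ih _ (fun x hx => h x (by simp [hx]))]
    simp [pvStepA, ha]

lemma pvFold_blank (run acc : List String) (h : ∀ x ∈ run, x = "") :
    run.foldl pvStepA (pvStepA acc "") = pvStepA acc "" := by
  induction run generalizing acc with
  | nil => simp
  | cons a t ih =>
    have ha : a = "" := h a (by simp)
    subst ha
    simp only [List.foldl_cons]
    rw [pvStepA_blank_idem]
    exact ih acc (fun x hx => h x (by simp [hx]))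

-- a homogeneous nonempty run processed element-wise by A equals B's one run step
lemma pvRun_eq (b : Bool) (run acc : List String) (hne : run ≠ [])
    (hom : ∀ x ∈ run, (x != "") = b) :
    run.foldl pvStepA acc = pvStepRun acc run := by
  cases run with
  | nil => exact absurd rfl hne
  | cons h t =>
    cases b with
    | true =>
      have hall : ∀ x ∈ h :: t, x ≠ "" := by
        intro x hx
        have := hom x hx
        simpa using this
      rw [pvFold_nonblank _ _ hall]
      have hh : h ≠ "" := hall h (by simp)
      unfold pvStepRun
      simp [hh]
    | false =>
      have hall : ∀ x ∈ h :: t, x = "" := by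
        intro x hx
        have := hom x hx
        simpa using this
      have hh : h = "" := hall h (by simp)
      subst hh
      have ht : ∀ x ∈ t, x = "" := fun x hx => hall x (by simp [hx])
      have : ("" :: t).foldl pvStepA acc = pvStepA acc "" := by
        simp only [List.foldl_cons]
        exact pvFold_blank t acc ht
      rw [this]
      unfold pvStepRun pvStepA
      simp only [List.headD_cons, ne_eq, not_true_eq_false, if_false]
      by_cases hc : acc.getLast?.getD "" ≠ ""
      · have hne0 : acc ≠ [] := by
          intro h0; rw [h0] at hc; simp at hc
        simp [hc, hne0]
      · simp [hc]

lemma pvGo_fold (xs : List String) (b : Bool) (cur acc : List String) (hne : cur ≠ [])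
    (hom : ∀ x ∈ cur, (x != "") = b) :
    (pvRunsGo b cur xs).foldl pvStepRun acc = (cur ++ xs).foldl pvStepA acc := by
  induction xs generalizing b cur acc with
  | nil =>
    simp only [pvRunsGo, List.foldl_cons, List.foldl_nil, List.append_nil]
    exact (pvRun_eq b cur acc hne hom).symm
  | cons x xs ih =>
    unfold pvRunsGo
    by_cases hx : (x != "") = b
    · simp only [hx]
      simp only [beq_self_eq_true, if_true]
      rw [ih b (cur ++ [x]) acc (by simp)
        (by intro y hy; rcases List.mem_append.mp hy with h | h
            · exact hom y h
            · simp at h; subst h; exact hx)]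
      simp
    · have hxb : ((x != "") == b) = false := by
        cases hb : (x != "") <;> cases b <;> simp_all
      simp only [hxb, Bool.false_eq_true, if_false]
      simp only [List.foldl_cons]
      rw [ih (x != "") [x] (pvStepRun acc cur) (by simp) (by simp)]
      rw [← pvRun_eq b cur acc hne hom]
      rw [← List.foldl_append]
      simp

lemma pvFold_runs (ls : List String) (acc : List String) :
    ls.foldl pvStepA acc = (pvRunsB ls).foldl pvStepRun acc := by
  cases ls with
  | nil => simp [pvRunsB]
  | cons l ls =>
    rw [pvRunsB, pvGo_fold ls (l != "") [l] acc (by simp) (by simp)]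
    simp

lemma pvLists (lines : List String) :
    lines.foldl (fun acc line => pvStepA acc (PySem.Str.join " " (PySem.Str.split₀ line))) [] =
    (pvRunsB (lines.map (fun line => PySem.Str.join " " (PySem.Str.split₀ line)))).foldl pvStepRun [] := by
  rw [← List.foldl_map]
  exact pvFold_runs _ _

lemma pvAlt_empty : clean_context_preserving_structure_py_alt "" = "" := by decide

-- ===== VERDICT (by name: the statement is the Claim_ definition above) =====
theorem clean_context_preserving_structure_py_spec : Claim_equal_clean_context_preserving_structure_py := by
  intro context _
  unfold Spec_clean_context_preserving_structure_py
  by_cases h0 : context = ""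
  · subst h0
    rw [pvAlt_empty]
    simp [clean_context_preserving_structure_py]
  · unfold clean_context_preserving_structure_py clean_context_preserving_structure_py_alt
    rw [if_neg h0]
    apply congrArg (PySem.Str.join "\n")
    exact pvLists _
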